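-- pv_equiv track=rewrite | github.com/bucks-maker/NBA_Monitoring | src/strategies/lag/monitor.py | _match_team_name
-- ===== SOURCE A (Python) =====
-- def _match_team_name(poly_outcome: str, api_outcomes: list) -> int | None:
--     poly_lower = poly_outcome.lower().strip()
--     for i, o in enumerate(api_outcomes):
--         if o.get("name", "").lower().strip() == poly_lower:
--             return i
--     for i, o in enumerate(api_outcomes):
--         api_name = o.get("name", "").lower().strip()
--         if poly_lower in api_name or api_name in poly_lower:
--             return i
--     poly_words = poly_lower.split()
--     if poly_words:
--         poly_last = poly_words[-1]
--         for i, o in enumerate(api_outcomes):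
--             api_words = o.get("name", "").lower().strip().split()
--             if api_words and api_words[-1] == poly_last:
--                 return i
--     return None
-- ===== SOURCE B (Python) =====
-- def _match_team_name(poly_outcome: str, api_outcomes: list) -> int | None:
--     # Single priority-scored pass instead of A's three sequential scans.
--     poly = poly_outcome.lower().strip()
--     poly_words = poly.split()
--     best_p = 0
--     best_i = None
--     for i, o in enumerate(api_outcomes):
--         name = o.get("name", "").lower().strip()
--         if name == poly:
--             p = 3
--         elif poly in name or name in poly:
--             p = 2
--         elif poly_words:
--             words = name.split()
--             p = 1 if words and words[-1] == poly_words[-1] else 0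
--         else:
--             p = 0
--         if p > best_p:
--             best_p, best_i = p, i
--     return best_i
-- ===== Notes on version B (the rewrite author's own statement) =====
-- stated objective: alternative
-- what changed: Replaces A's three sequential full scans (exact, substring, last-word) by a single pass that scores each outcome with a priority 3/2/1/0 and keeps the earliest index of the strictly highest priority.
import Mathlib
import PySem

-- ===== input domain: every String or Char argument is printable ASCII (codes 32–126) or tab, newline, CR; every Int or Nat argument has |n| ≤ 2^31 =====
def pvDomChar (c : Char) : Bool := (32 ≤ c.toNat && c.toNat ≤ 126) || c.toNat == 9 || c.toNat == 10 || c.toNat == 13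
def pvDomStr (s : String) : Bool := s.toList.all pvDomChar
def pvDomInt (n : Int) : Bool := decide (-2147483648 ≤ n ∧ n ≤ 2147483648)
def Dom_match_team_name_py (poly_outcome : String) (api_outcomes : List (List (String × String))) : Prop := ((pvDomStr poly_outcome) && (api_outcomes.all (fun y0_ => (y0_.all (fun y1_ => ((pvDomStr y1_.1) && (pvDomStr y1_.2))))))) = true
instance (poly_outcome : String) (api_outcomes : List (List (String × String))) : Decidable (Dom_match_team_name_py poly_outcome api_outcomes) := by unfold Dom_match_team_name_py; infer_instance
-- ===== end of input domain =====

-- B replaces A's three sequential scans by one priority-scored pass; objective: alternative decomposition (same cost).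

-- ===== PORT A =====
-- o.get("name", "").lower().strip(), shared by both Python sources
def pvNorm (o : List (String × String)) : String :=
  PySem.Str.strip (PySem.Str.lower (PySem.Dict.getD (PySem.Dict.mk o) "name" ""))

-- first loop: exact match
def aLoop1 (pl : String) (xs : List (List (String × String))) (i : Int) : Option Int :=
  match xs with
  | [] => none
  | o :: rest => if pvNorm o == pl then some i else aLoop1 pl rest (i + 1)

-- second loop: substring either way
def aLoop2 (pl : String) (xs : List (List (String × String))) (i : Int) : Option Int :=
  match xs with
  | [] => none
  | o :: rest =>
      if PySem.Str.isIn pl (pvNorm o) || PySem.Str.isIn (pvNorm o) pl then some i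
      else aLoop2 pl rest (i + 1)

-- third loop: api_words nonempty and api_words[-1] == poly_last (getLast? encodes both)
def aLoop3 (plast : String) (xs : List (List (String × String))) (i : Int) : Option Int :=
  match xs with
  | [] => none
  | o :: rest =>
      match (PySem.Str.split₀ (pvNorm o)).getLast? with
      | some w => if w == plast then some i else aLoop3 plast rest (i + 1)
      | none => aLoop3 plast rest (i + 1)

def match_team_name_py (poly_outcome : String) (api_outcomes : List (List (String × String))) : Option Int :=
  match aLoop1 (PySem.Str.strip (PySem.Str.lower poly_outcome)) api_outcomes 0 with
  | some i => some i
  | none =>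
    match aLoop2 (PySem.Str.strip (PySem.Str.lower poly_outcome)) api_outcomes 0 with
    | some i => some i
    | none =>
      match (PySem.Str.split₀ (PySem.Str.strip (PySem.Str.lower poly_outcome))).getLast? with
      | some plast => aLoop3 plast api_outcomes 0
      | none => none

-- ===== PORT B =====
-- priority of one outcome: 3 exact, 2 substring, 1 last-word (when poly has words), 0 none
def pvPrio (pl : String) (pw : List String) (o : List (String × String)) : Nat :=
  if pvNorm o == pl then 3
  else if PySem.Str.isIn pl (pvNorm o) || PySem.Str.isIn (pvNorm o) pl then 2
  else
    match pw.getLast? with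
    | some plast =>
      match (PySem.Str.split₀ (pvNorm o)).getLast? with
      | some w => if w == plast then 1 else 0
      | none => 0
    | none => 0

-- single pass keeping the earliest index of the strictly highest priority
def bLoop (pl : String) (pw : List String) (xs : List (List (String × String)))
    (i : Int) (bestp : Nat) (besti : Option Int) : Option Int :=
  match xs with
  | [] => besti
  | o :: rest =>
      if bestp < pvPrio pl pw o then bLoop pl pw rest (i + 1) (pvPrio pl pw o) (some i)
      else bLoop pl pw rest (i + 1) bestp besti

def match_team_name_py_alt (poly_outcome : String) (api_outcomes : List (List (String × String))) : Option Int :=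
  bLoop (PySem.Str.strip (PySem.Str.lower poly_outcome))
    (PySem.Str.split₀ (PySem.Str.strip (PySem.Str.lower poly_outcome))) api_outcomes 0 0 none

-- ===== PRECONDITION & SPEC =====
def Spec_match_team_name_py (poly_outcome : String) (api_outcomes : List (List (String × String))) (out : Option Int) : Prop := out = match_team_name_py_alt poly_outcome api_outcomes
instance (poly_outcome : String) (api_outcomes : List (List (String × String))) (out : Option Int) : Decidable (Spec_match_team_name_py poly_outcome api_outcomes out) := by unfold Spec_match_team_name_py; infer_instance

-- ===== CLAIM (what is proved, stated in full; the proofs are below) =====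
def Claim_equal_match_team_name_py : Prop := ∀ (poly_outcome : String) (api_outcomes : List (List (String × String))), Dom_match_team_name_py poly_outcome api_outcomes → Spec_match_team_name_py poly_outcome api_outcomes (match_team_name_py poly_outcome api_outcomes)

-- ===== LEMMAS AND PROOFS =====

-- the cascade A computes, with a pending best carried over from B's loop state
def pvRhs (pl : String) (pw : List String) (xs : List (List (String × String))) (i : Int)
    (bestp : Nat) (besti : Option Int) : Option Int :=
  match aLoop1 pl xs i with
  | some j => some j
  | none =>
    if 2 ≤ bestp then besti else
    match aLoop2 pl xs i with
    | some j => some j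
    | none =>
      if 1 ≤ bestp then besti else
      match pw.getLast? with
      | some plast =>
        match aLoop3 plast xs i with
        | some j => some j
        | none => besti
      | none => besti

lemma aLoop1_cons (pl : String) (o : List (String × String)) (rest : List (List (String × String))) (i : Int) :
    aLoop1 pl (o :: rest) i = if pvNorm o == pl then some i else aLoop1 pl rest (i + 1) := by rw [aLoop1]

lemma aLoop2_cons (pl : String) (o : List (String × String)) (rest : List (List (String × String))) (i : Int) :
    aLoop2 pl (o :: rest) i =
      if PySem.Str.isIn pl (pvNorm o) || PySem.Str.isIn (pvNorm o) pl then some i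
      else aLoop2 pl rest (i + 1) := by rw [aLoop2]

lemma aLoop3_cons (plast : String) (o : List (String × String)) (rest : List (List (String × String))) (i : Int) :
    aLoop3 plast (o :: rest) i =
      match (PySem.Str.split₀ (pvNorm o)).getLast? with
      | some w => if w == plast then some i else aLoop3 plast rest (i + 1)
      | none => aLoop3 plast rest (i + 1) := by rw [aLoop3]

lemma bLoop_cons (pl : String) (pw : List String) (o : List (String × String))
    (rest : List (List (String × String))) (i : Int) (bestp : Nat) (besti : Option Int) :
    bLoop pl pw (o :: rest) i bestp besti =
      if bestp < pvPrio pl pw o then bLoop pl pw rest (i + 1) (pvPrio pl pw o) (some i)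
      else bLoop pl pw rest (i + 1) bestp besti := by rw [bLoop]

lemma pvPrio_le (pl : String) (pw : List String) (o : List (String × String)) :
    pvPrio pl pw o ≤ 3 := by
  unfold pvPrio
  split_ifs with h1 h2
  · omega
  · omega
  · rcases pw.getLast? with _ | plast
    · dsimp only; omega
    · rcases (PySem.Str.split₀ (pvNorm o)).getLast? with _ | w
      · dsimp only; omega
      · dsimp only; split_ifs <;> omega

lemma bLoop_three (pl : String) (pw : List String) (xs : List (List (String × String)))
    (i : Int) (besti : Option Int) : bLoop pl pw xs i 3 besti = besti := by
  induction xs generalizing i with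
  | nil => rfl
  | cons o rest ih =>
      have h := pvPrio_le pl pw o
      rw [bLoop_cons, if_neg (by omega : ¬ 3 < pvPrio pl pw o)]
      exact ih _

lemma bLoop_eq_pvRhs (pl : String) (pw : List String) (xs : List (List (String × String))) :
    ∀ (i : Int) (bestp : Nat) (besti : Option Int), bestp ≤ 2 →
      bLoop pl pw xs i bestp besti = pvRhs pl pw xs i bestp besti := by
  induction xs with
  | nil =>
      intro i bestp besti _
      unfold bLoop pvRhs aLoop1 aLoop2
      rcases pw.getLast? with _ | plast
      · split_ifs <;> rfl
      · unfold aLoop3; split_ifs <;> rfl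
  | cons o rest ih =>
      intro i bestp besti hbp
      by_cases he : (pvNorm o == pl) = true
      · -- exact match: priority 3
        have hp : pvPrio pl pw o = 3 := by unfold pvPrio; rw [if_pos he]
        rw [bLoop_cons, hp, if_pos (by omega : bestp < 3), bLoop_three]
        unfold pvRhs
        rw [aLoop1_cons, if_pos he]
      · by_cases hs : (PySem.Str.isIn pl (pvNorm o) || PySem.Str.isIn (pvNorm o) pl) = true
        · -- substring: priority 2
          have hp : pvPrio pl pw o = 2 := by unfold pvPrio; rw [if_neg he, if_pos hs]
          rw [bLoop_cons, hp]
          by_cases hb : bestp < 2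
          · rw [if_pos hb, ih _ 2 (some i) (by omega)]
            unfold pvRhs
            rw [aLoop1_cons, if_neg he, aLoop2_cons, if_pos hs]
            simp only [eq_false (by omega : ¬ (2 ≤ bestp)), eq_true (by omega : (2:Nat) ≤ 2),
              if_true, if_false]
          · rw [if_neg hb, ih _ bestp besti hbp]
            unfold pvRhs
            rw [aLoop1_cons, if_neg he]
            simp only [eq_true (by omega : 2 ≤ bestp), if_true]
        · -- priority is 1 or 0
          rcases hw : pw.getLast? with _ | plast
          · -- poly has no words: priority 0
            have hp : pvPrio pl pw o = 0 := by
              unfold pvPrio; rw [if_neg he, if_neg hs]; simp only [hw]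
            rw [bLoop_cons, hp, if_neg (by omega : ¬ bestp < 0), ih _ bestp besti hbp]
            unfold pvRhs
            rw [aLoop1_cons, if_neg he, aLoop2_cons, if_neg hs]
            simp only [hw]
          · rcases hv : (PySem.Str.split₀ (pvNorm o)).getLast? with _ | w
            · -- api name has no words: priority 0
              have hp : pvPrio pl pw o = 0 := by
                unfold pvPrio; rw [if_neg he, if_neg hs]; simp only [hw, hv]
              rw [bLoop_cons, hp, if_neg (by omega : ¬ bestp < 0), ih _ bestp besti hbp]
              unfold pvRhs
              rw [aLoop1_cons, if_neg he, aLoop2_cons, if_neg hs]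
              simp only [hw, aLoop3_cons, hv]
            · by_cases hwe : (w == plast) = true
              · -- last-word match: priority 1
                have hp : pvPrio pl pw o = 1 := by
                  unfold pvPrio; rw [if_neg he, if_neg hs]; simp only [hw, hv, hwe, if_true]
                rw [bLoop_cons, hp]
                by_cases hb : bestp < 1
                · rw [if_pos hb, ih _ 1 (some i) (by omega)]
                  unfold pvRhs
                  rw [aLoop1_cons, if_neg he, aLoop2_cons, if_neg hs]
                  simp only [hw, aLoop3_cons, hv, hwe, if_true,
                    eq_false (by omega : ¬ (2 ≤ 1)), eq_false (by omega : ¬ (2 ≤ bestp)),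
                    eq_true (by omega : (1:Nat) ≤ 1), eq_false (by omega : ¬ (1 ≤ bestp)),
                    if_false]
                · rw [if_neg hb, ih _ bestp besti hbp]
                  unfold pvRhs
                  rw [aLoop1_cons, if_neg he, aLoop2_cons, if_neg hs]
                  simp only [eq_true (by omega : 1 ≤ bestp), if_true]
              · -- last words differ: priority 0
                rw [Bool.not_eq_true] at hwe
                have hp : pvPrio pl pw o = 0 := by
                  unfold pvPrio; rw [if_neg he, if_neg hs]
                  simp only [hw, hv, hwe, Bool.false_eq_true, if_false]
                rw [bLoop_cons, hp, if_neg (by omega : ¬ bestp < 0), ih _ bestp besti hbp]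
                unfold pvRhs
                rw [aLoop1_cons, if_neg he, aLoop2_cons, if_neg hs]
                simp only [hw, aLoop3_cons, hv, hwe, Bool.false_eq_true, if_false]

-- ===== VERDICT (by name: the statement is the Claim_ definition above) =====
theorem match_team_name_py_spec : Claim_equal_match_team_name_py := by
  intro poly xs _
  unfold Spec_match_team_name_py match_team_name_py match_team_name_py_alt
  rw [bLoop_eq_pvRhs _ _ _ 0 0 none (by omega)]
  unfold pvRhs
  rcases aLoop1 (PySem.Str.strip (PySem.Str.lower poly)) xs 0 with _ | j
  · rcases aLoop2 (PySem.Str.strip (PySem.Str.lower poly)) xs 0 with _ | j2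
    · rcases (PySem.Str.split₀ (PySem.Str.strip (PySem.Str.lower poly))).getLast? with _ | plast
      · simp
      · rcases h4 : aLoop3 plast xs 0 with _ | j3 <;> simp [h4]
    · simp
  · simp
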